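-- pv_equiv track=rewrite | github.com/longvacation13/prom | app.py | comma_machine
-- ===== SOURCE A (Python) =====
-- def comma_machine(n):
--     strN = str(n) #문자화
--     lenN = len(strN) #문자길이
--     len_c = (lenN//3)*3 # 3의 배수단위로 개수구함
--     str_list = []
--     i = len_c
--     str_list.append(strN[0:-(len_c)]) # 처음은 따로넣음 12000의 경우 '12'부분
--     while i > 3 :
--         str_list.append(strN[-(i):-(i-3)]) #3의배수 단위로 넣어줌
--         i -= 3
--     str_list.append(strN[-3::]) #끝은 따로 넣음
--     a= ','
--     return a.join(str_list).strip(',')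
-- ===== SOURCE B (Python) =====
-- def comma_machine(n):
--     s = str(n)
--     L = len(s)
--     out = []
--     for i, ch in enumerate(s):
--         if i > 0 and (L - i) % 3 == 0:
--             out.append(',')
--         out.append(ch)
--     return ''.join(out)
-- ===== Notes on version B (the rewrite author's own statement) =====
-- stated objective: simpler
-- what changed: Replaced A's leading-slice + backwards while-loop over 3-char slices + trailing-slice + join + strip(',') scheme with a single uniform forward pass over str(n) that inserts a comma before index i whenever i>0 and (len-i)%3==0, so no slicing, no list of chunks and no strip are needed.
import Mathlib
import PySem

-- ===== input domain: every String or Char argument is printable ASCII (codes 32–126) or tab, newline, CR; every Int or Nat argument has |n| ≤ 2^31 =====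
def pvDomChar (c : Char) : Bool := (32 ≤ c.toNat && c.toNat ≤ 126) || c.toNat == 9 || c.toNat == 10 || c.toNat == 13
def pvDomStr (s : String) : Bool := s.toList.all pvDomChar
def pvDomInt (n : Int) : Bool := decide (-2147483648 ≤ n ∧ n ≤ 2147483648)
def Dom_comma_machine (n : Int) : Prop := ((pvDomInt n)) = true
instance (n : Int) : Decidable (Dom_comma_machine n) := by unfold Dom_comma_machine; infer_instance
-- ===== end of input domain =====

-- B replaces A's leading-slice + backwards while-loop of 3-char slices + strip(',') with one
-- uniform forward pass inserting a comma before index i when i>0 and (len-i)%3==0 (objective: simpler).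

-- ===== PORT A =====
-- the 'while i > 3' loop of A: appends strN[-i:-(i-3)] and decrements i by 3
def commaChunks (strN : List Char) (i : Int) (acc : List (List Char)) : List (List Char) :=
  if 3 < i then
    commaChunks strN (i - 3) (acc ++ [PySem.List.slice strN (some (-i)) (some (-(i - 3)))])
  else acc
termination_by i.toNat
decreasing_by omega

def comma_machine (n : Int) : String :=
  let strN := PySem.Int.toChars n
  let lenN : Int := (strN.length : Int)
  let len_c : Int := PySem.Int.floordiv lenN 3 * 3
  let str_list : List (List Char) := [PySem.List.slice strN (some 0) (some (-len_c))]
  let str_list := commaChunks strN len_c str_list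
  let str_list := str_list ++ [PySem.List.slice strN (some (-3)) none]
  String.ofList (PySem.Chars.stripChars (PySem.Chars.join [','] str_list) [','])

-- ===== PORT B =====
def comma_machine_alt (n : Int) : String :=
  let s := PySem.Int.toChars n
  let L : Int := (s.length : Int)
  let out : List Char := (PySem.List.enumerate s 0).foldl
    (fun acc p =>
      (if 0 < p.1 ∧ PySem.Int.mod (L - p.1) 3 = 0 then acc ++ [','] else acc) ++ [p.2]) []
  String.ofList out

-- ===== PRECONDITION & SPEC =====
def Spec_comma_machine (n : Int) (out : String) : Prop := out = comma_machine_alt n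
instance (n : Int) (out : String) : Decidable (Spec_comma_machine n out) := by unfold Spec_comma_machine; infer_instance

-- ===== CLAIM (what is proved, stated in full; the proofs are below) =====
def Claim_equal_comma_machine : Prop := ∀ (n : Int), Dom_comma_machine n → Spec_comma_machine n (comma_machine n)

-- ===== LEMMAS AND PROOFS =====

-- the common shape both programs produce: str(n) with a comma before every block of 3 from the right
def pvGrp (s : List Char) : List Char :=
  if s.length ≤ 3 then s
  else pvGrp (s.take (s.length - 3)) ++ ',' :: s.drop (s.length - 3)
termination_by s.length
decreasing_by simp; omega

theorem pvGrp_small {s : List Char} (h : s.length ≤ 3) : pvGrp s = s := by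
  rw [pvGrp]; simp [h]

theorem pvGrp_step {s : List Char} (h : 3 < s.length) :
    pvGrp s = pvGrp (s.take (s.length - 3)) ++ ',' :: s.drop (s.length - 3) := by
  rw [pvGrp]; simp [Nat.not_le.mpr h]

theorem pvGrp_head? (s : List Char) : (pvGrp s).head? = s.head? := by
  induction hN : s.length using Nat.strong_induction_on generalizing s with
  | _ N IH =>
    by_cases h : s.length ≤ 3
    · rw [pvGrp_small h]
    · rw [Nat.not_le] at h
      rcases s with _ | ⟨a, t⟩
      · simp at h
      · rw [pvGrp_step h]
        simp only [List.length_cons] at h hN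
        have h4 : (a :: t).length - 3 = (t.length - 3) + 1 := by
          simp only [List.length_cons]; omega
        rw [h4, List.take_succ_cons, List.head?_append]
        have hlen : (a :: t.take (t.length - 3)).length < N := by
          simp only [List.length_cons, List.length_take]
          omega
        rw [IH _ hlen _ rfl]
        simp

theorem pvGrp_getLast? (s : List Char) : (pvGrp s).getLast? = s.getLast? := by
  by_cases h : s.length ≤ 3
  · rw [pvGrp_small h]
  · rw [Nat.not_le] at h
    rw [pvGrp_step h]
    have hd : s.drop (s.length - 3) ≠ [] := by
      intro hcon
      have := congrArg List.length hcon
      simp at this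
      omega
    obtain ⟨b, hb⟩ : ∃ b, (s.drop (s.length - 3)).getLast? = some b := by
      cases hcon : (s.drop (s.length - 3)).getLast? with
      | none => exact absurd (List.getLast?_eq_none_iff.mp hcon) hd
      | some b => exact ⟨b, rfl⟩
    conv_rhs => rw [← List.take_append_drop (s.length - 3) s]
    rw [List.getLast?_append, List.getLast?_append, List.getLast?_cons, hb]
    simp

theorem pvJoin_append_singleton (xs : List (List Char)) (y : List Char) (h : xs ≠ []) :
    PySem.Chars.join [','] (xs ++ [y]) = PySem.Chars.join [','] xs ++ ',' :: y := by
  induction xs with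
  | nil => simp at h
  | cons a t ih =>
    rcases t with _ | ⟨b, t'⟩
    · rw [List.cons_append, List.nil_append, PySem.Chars.join_cons_cons,
        PySem.Chars.join_singleton, PySem.Chars.join_singleton]
      simp
    · have hrec := ih (by simp)
      rw [show (a :: b :: t') ++ [y] = a :: (b :: (t' ++ [y])) from rfl,
        PySem.Chars.join_cons_cons,
        show b :: (t' ++ [y]) = (b :: t') ++ [y] from rfl, hrec,
        PySem.Chars.join_cons_cons]
      simp

-- s[-j:-k] for 0 < k ≤ j ≤ len(s)
theorem pvSlice_neg_neg (xs : List Char) (j k : Nat) (hk : 0 < k) (hkj : k ≤ j)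
    (hj : j ≤ xs.length) :
    PySem.List.slice xs (some (-(j : Int))) (some (-(k : Int))) =
      (xs.drop (xs.length - j)).take (j - k) := by
  simp only [PySem.List.slice, PySem.List.clampIdx]
  rw [if_pos (by omega : -(j : Int) < 0), if_pos (by omega : -(k : Int) < 0),
    if_neg (by omega : ¬ ((xs.length : Int) + -(j : Int) < 0)),
    if_neg (by omega : ¬ ((xs.length : Int) + -(k : Int) < 0))]
  rw [show ((xs.length : Int) + -(j : Int)).toNat = xs.length - j from by omega,
    show ((xs.length : Int) + -(k : Int)).toNat = xs.length - k from by omega]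
  congr 1
  omega

theorem pvStrip_cons (x : List Char) :
    PySem.Chars.stripChars (',' :: x) [','] = PySem.Chars.stripChars x [','] := by
  simp only [PySem.Chars.stripChars]
  rw [List.dropWhile_cons_of_pos (by decide)]

theorem pvStrip_id (x : List Char) (a b : Char) (ha : x.head? = some a) (ha' : a ≠ ',')
    (hb : x.getLast? = some b) (hb' : b ≠ ',') :
    PySem.Chars.stripChars x [','] = x := by
  rcases x with _ | ⟨c, t⟩
  · simp at ha
  · have hc : c = a := by simpa using ha
    subst hc
    simp only [PySem.Chars.stripChars]
    rw [List.dropWhile_cons_of_neg (by simpa using ha')]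
    have hrev : (c :: t).reverse.head? = some b := by
      rw [List.head?_reverse]; exact hb
    rcases hx : (c :: t).reverse with _ | ⟨d, r⟩
    · simp at hx
    · have hd : d = b := by rw [hx] at hrev; simpa using hrev
      subst hd
      rw [List.dropWhile_cons_of_neg (by simpa using hb')]
      rw [← hx, List.reverse_reverse]

-- str(n) never contains ',' and is nonempty
theorem pvToDigitsCore_succ (b f m : Nat) (l : List Char) :
    Nat.toDigitsCore b (f + 1) m l =
      if m / b = 0 then (m % b).digitChar :: l
      else Nat.toDigitsCore b f (m / b) ((m % b).digitChar :: l) := by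
  simp only [Nat.toDigitsCore]

theorem pvDigitChar_ne_comma (k : Nat) (hk : k < 10) : Nat.digitChar k ≠ ',' := by
  interval_cases k <;> decide

theorem pvToDigitsCore_mem (f : Nat) : ∀ (m : Nat) (l : List Char) (c : Char),
    c ∈ Nat.toDigitsCore 10 f m l → c ∈ l ∨ ∃ k, k < 10 ∧ c = Nat.digitChar k := by
  induction f with
  | zero => intro m l c h; exact Or.inl h
  | succ f ih =>
    intro m l c h
    rw [pvToDigitsCore_succ] at h
    by_cases hm : m / 10 = 0
    · rw [if_pos hm, List.mem_cons] at h
      rcases h with h | h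
      · exact Or.inr ⟨m % 10, Nat.mod_lt _ (by norm_num), h⟩
      · exact Or.inl h
    · rw [if_neg hm] at h
      rcases ih (m / 10) _ _ h with h' | h'
      · rw [List.mem_cons] at h'
        rcases h' with h' | h'
        · exact Or.inr ⟨m % 10, Nat.mod_lt _ (by norm_num), h'⟩
        · exact Or.inl h'
      · exact Or.inr h'

theorem pvToDigitsCore_eq_nil (f : Nat) : ∀ (m : Nat) (l : List Char),
    Nat.toDigitsCore 10 f m l = [] → l = [] := by
  induction f with
  | zero => intro m l h; exact h
  | succ f ih =>
    intro m l h
    rw [pvToDigitsCore_succ] at h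
    by_cases hm : m / 10 = 0
    · rw [if_pos hm] at h; simp at h
    · rw [if_neg hm] at h
      have := ih _ _ h
      simp at this

theorem pvToDigits_ne_nil (m : Nat) : Nat.toDigits 10 m ≠ [] := by
  intro h
  rw [Nat.toDigits, pvToDigitsCore_succ] at h
  by_cases hm : m / 10 = 0
  · rw [if_pos hm] at h; simp at h
  · rw [if_neg hm] at h
    have := pvToDigitsCore_eq_nil _ _ _ h
    simp at this

theorem pvToChars_ne_nil (n : Int) : PySem.Int.toChars n ≠ [] := by
  by_cases hn : n < 0
  · rw [PySem.Int.toChars, if_pos hn]; simp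
  · rw [PySem.Int.toChars, if_neg hn]; exact pvToDigits_ne_nil _

theorem pvToChars_not_comma (n : Int) (c : Char) (h : c ∈ PySem.Int.toChars n) : c ≠ ',' := by
  by_cases hn : n < 0
  · rw [PySem.Int.toChars, if_pos hn, List.mem_cons] at h
    rcases h with h | h
    · subst h; decide
    · rw [Nat.toDigits] at h
      rcases pvToDigitsCore_mem _ _ _ _ h with h' | h'
      · exact absurd h' List.not_mem_nil
      · rcases h' with ⟨k, hk, rfl⟩; exact pvDigitChar_ne_comma k hk
  · rw [PySem.Int.toChars, if_neg hn, Nat.toDigits] at h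
    rcases pvToDigitsCore_mem _ _ _ _ h with h' | h'
    · exact absurd h' List.not_mem_nil
    · rcases h' with ⟨k, hk, rfl⟩; exact pvDigitChar_ne_comma k hk

-- ===== the A side: the joined chunk list =====

theorem commaChunks_pos (s : List Char) (i : Int) (acc : List (List Char)) (h : 3 < i) :
    commaChunks s i acc =
      commaChunks s (i - 3)
        (acc ++ [PySem.List.slice s (some (-i)) (some (-(i - 3)))]) := by
  rw [commaChunks, if_pos h]

theorem commaChunks_neg (s : List Char) (i : Int) (acc : List (List Char)) (h : ¬ 3 < i) :
    commaChunks s i acc = acc := by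
  rw [commaChunks, if_neg h]

-- the body slice strN[-i:-(i-3)] for a natural i with 4 ≤ i ≤ len
theorem pvChunk_eval (s : List Char) (j : Nat) (h4 : 4 ≤ j) (hj : j ≤ s.length) :
    PySem.List.slice s (some (-((j : Nat) : Int))) (some (-(((j : Nat) : Int) - 3))) =
      (s.drop (s.length - j)).take 3 := by
  rw [show ((j : Nat) : Int) - 3 = (((j - 3 : Nat)) : Int) from by push_cast [Nat.cast_sub (by omega : 3 ≤ j)]; ring]
  rw [pvSlice_neg_neg s j (j - 3) (by omega) (by omega) hj]
  congr 1
  omega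

theorem pvChunks_shift (s : List Char) (h7 : 7 ≤ s.length) :
    ∀ (m : Nat), 1 ≤ m → 3 * m ≤ s.length - 3 → ∀ (acc : List (List Char)),
      commaChunks s ((3 * m + 3 : Nat) : Int) acc =
        commaChunks (s.take (s.length - 3)) ((3 * m : Nat) : Int) acc ++
          [(s.drop (s.length - 6)).take 3] := by
  intro m
  induction m with
  | zero => omega
  | succ m ih =>
    intro _ hle acc
    rw [commaChunks_pos s ((3 * (m + 1) + 3 : Nat) : Int) acc (by push_cast; omega)]
    rw [pvChunk_eval s (3 * (m + 1) + 3) (by omega) (by omega)]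
    rw [show ((3 * (m + 1) + 3 : Nat) : Int) - 3 = ((3 * m + 3 : Nat) : Int) from by push_cast; ring]
    by_cases hm : m = 0
    · subst hm
      rw [show s.length - (3 * (0 + 1) + 3) = s.length - 6 from by omega,
        commaChunks_neg s ((3 * 0 + 3 : Nat) : Int) _ (by norm_num),
        commaChunks_neg (s.take (s.length - 3)) ((3 * (0 + 1) : Nat) : Int) acc (by norm_num)]
    · have hm1 : 1 ≤ m := by omega
      rw [ih hm1 (by omega)]
      rw [commaChunks_pos (s.take (s.length - 3)) ((3 * (m + 1) : Nat) : Int) acc (by push_cast; omega)]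
      rw [pvChunk_eval (s.take (s.length - 3)) (3 * (m + 1)) (by omega)
        (by rw [List.length_take_of_le (by omega)]; omega)]
      rw [show ((3 * (m + 1) : Nat) : Int) - 3 = ((3 * m : Nat) : Int) from by push_cast; ring]
      congr 3
      rw [List.length_take_of_le (by omega), List.drop_take, List.take_take,
        show min 3 (s.length - 3 - (s.length - 3 - 3 * (m + 1))) = 3 from by omega,
        show s.length - 3 - 3 * (m + 1) = s.length - (3 * (m + 1) + 3) from by omega]

theorem pvJoinA (s : List Char) :
    PySem.Chars.join [','] (commaChunks s (PySem.Int.floordiv ((s.length : Nat) : Int) 3 * 3)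
        [PySem.List.slice s (some 0) (some (-(PySem.Int.floordiv ((s.length : Nat) : Int) 3 * 3)))]
      ++ [PySem.List.slice s (some (-3)) none])
    = (if s.length ≤ 3 ∨ 3 ∣ s.length then [','] else []) ++ pvGrp s := by
  induction hN : s.length using Nat.strong_induction_on generalizing s with
  | _ N IH =>
    subst hN
    have hfd : PySem.Int.floordiv ((s.length : Nat) : Int) 3 * 3 =
        ((s.length / 3 * 3 : Nat) : Int) := by
      have h1 : PySem.Int.floordiv ((s.length : Nat) : Int) 3 = ((s.length / 3 : Nat) : Int) := by
        exact_mod_cast PySem.Int.floordiv_natCast s.length 3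
      rw [h1]; push_cast; ring
    rw [hfd]
    rw [PySem.List.slice_from_neg_ofNat s 3 (by norm_num)]
    by_cases h3 : s.length ≤ 3
    · -- no loop iterations; the leading piece is empty
      have hfirst : PySem.List.slice s (some 0) (some (-((s.length / 3 * 3 : Nat) : Int))) = [] := by
        by_cases hc : s.length / 3 * 3 = 0
        · rw [hc, PySem.List.slice_zero_start,
            show (-(((0 : Nat) : Int))) = (((0 : Nat)) : Int) from by norm_num,
            PySem.List.slice_to_natCast]
          simp
        · have hc3 : s.length / 3 * 3 = 3 := by omega
          rw [hc3, PySem.List.slice_zero_start,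
            PySem.List.slice_to_neg_natCast s 3 (by norm_num)]
          rw [show s.length - 3 = 0 from by omega]
          simp
      rw [hfirst]
      rw [commaChunks_neg _ _ _ (by
        intro hcon
        have : (3 : Int) < ((s.length / 3 * 3 : Nat) : Int) := hcon
        have h9 : (s.length / 3 * 3 : Nat) ≤ 3 := by omega
        omega)]
      rw [pvGrp_small h3, if_pos (Or.inl h3)]
      rw [show s.length - 3 = 0 from by omega, List.drop_zero]
      rw [show [([] : List Char)] ++ [s] = [([] : List Char), s] from rfl,
        PySem.Chars.join_cons_cons, PySem.Chars.join_singleton]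
      simp
    · rw [Nat.not_le] at h3
      by_cases hL7 : 7 ≤ s.length
      · -- peel the last three characters
        have hcge : 6 ≤ s.length / 3 * 3 := by omega
        have hcle : s.length / 3 * 3 ≤ s.length := by omega
        have htl : (s.take (s.length - 3)).length = s.length - 3 :=
          List.length_take_of_le (by omega)
        have hchunks := pvChunks_shift s hL7 ((s.length / 3 * 3 - 3) / 3) (by omega) (by omega)
          [PySem.List.slice s (some 0) (some (-((s.length / 3 * 3 : Nat) : Int)))]
        rw [show 3 * ((s.length / 3 * 3 - 3) / 3) + 3 = s.length / 3 * 3 from by omega] at hchunks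
        rw [show 3 * ((s.length / 3 * 3 - 3) / 3) = s.length / 3 * 3 - 3 from by omega] at hchunks
        rw [hchunks]
        have hfirst : PySem.List.slice s (some 0) (some (-((s.length / 3 * 3 : Nat) : Int))) =
            PySem.List.slice (s.take (s.length - 3)) (some 0)
              (some (-((s.length / 3 * 3 - 3 : Nat) : Int))) := by
          rw [PySem.List.slice_zero_start, PySem.List.slice_zero_start,
            PySem.List.slice_to_neg_natCast s (s.length / 3 * 3) (by omega),
            PySem.List.slice_to_neg_natCast (s.take (s.length - 3)) (s.length / 3 * 3 - 3) (by omega),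
            htl, List.take_take,
            show min (s.length - 3 - (s.length / 3 * 3 - 3)) (s.length - 3) =
              s.length - s.length / 3 * 3 from by omega]
        have hlast : (s.drop (s.length - 6)).take 3 =
            PySem.List.slice (s.take (s.length - 3)) (some (-3)) none := by
          rw [PySem.List.slice_from_neg_ofNat (s.take (s.length - 3)) 3 (by norm_num), htl,
            List.drop_take, show s.length - 3 - (s.length - 3 - 3) = 3 from by omega,
            show s.length - 3 - 3 = s.length - 6 from by omega]
        have hfd' : ((s.length / 3 * 3 - 3 : Nat) : Int) =
            PySem.Int.floordiv (((s.length - 3 : Nat)) : Int) 3 * 3 := by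
          have h1 : PySem.Int.floordiv (((s.length - 3 : Nat)) : Int) 3 =
              (((s.length - 3) / 3 : Nat) : Int) := by
            exact_mod_cast PySem.Int.floordiv_natCast (s.length - 3) 3
          rw [h1, show (((s.length - 3) / 3 : Nat) : Int) * 3 =
              (((s.length - 3) / 3 * 3 : Nat) : Int) from by push_cast; ring]
          exact_mod_cast (by omega : s.length / 3 * 3 - 3 = (s.length - 3) / 3 * 3)
        rw [hfirst, hlast, hfd']
        rw [pvJoin_append_singleton _ _ (by
          intro hcon
          have := congrArg List.length hcon
          simp at this)]
        rw [IH (s.length - 3) (by omega) (s.take (s.length - 3)) htl]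
        rw [pvGrp_step h3]
        have hcond : ((s.length - 3) ≤ 3 ∨ 3 ∣ (s.length - 3))
            ↔ (s.length ≤ 3 ∨ 3 ∣ s.length) := by
          constructor
          · rintro (h | h)
            · omega
            · exact Or.inr (by omega)
          · rintro (h | h)
            · omega
            · exact Or.inr (by omega)
        by_cases hdv : s.length ≤ 3 ∨ 3 ∣ s.length
        · rw [if_pos hdv, if_pos (hcond.mpr hdv)]; simp
        · rw [if_neg hdv, if_neg (fun hx => hdv (hcond.mp hx))]; simp
      · -- 4 ≤ len ≤ 6
        rw [Nat.not_le] at hL7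
        by_cases h6 : s.length = 6
        · have hc6 : s.length / 3 * 3 = 6 := by omega
          have hfirst : PySem.List.slice s (some 0) (some (-((s.length / 3 * 3 : Nat) : Int))) = [] := by
            rw [hc6, PySem.List.slice_zero_start,
              PySem.List.slice_to_neg_natCast s 6 (by norm_num)]
            rw [show s.length - 6 = 0 from by omega]
            simp
          rw [hfirst, hc6]
          rw [commaChunks_pos s _ _ (by norm_num)]
          rw [pvChunk_eval s 6 (by norm_num) (by omega)]
          rw [show ((6 : Nat) : Int) - 3 = ((3 : Nat) : Int) from by norm_num]
          rw [commaChunks_neg s _ _ (by norm_num)]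
          rw [pvGrp_step h3]
          rw [pvGrp_small (by rw [List.length_take_of_le (by omega)]; omega)]
          rw [if_pos (Or.inr (by omega))]
          rw [show s.length - 6 = 0 from by omega, List.drop_zero, show s.length - 3 = 3 from by omega]
          rw [show [([] : List Char)] ++ [s.take 3] ++ [s.drop 3] =
              [([] : List Char), s.take 3, s.drop 3] from rfl,
            PySem.Chars.join_cons_cons, PySem.Chars.join_cons_cons, PySem.Chars.join_singleton]
          simp
        · -- len = 4 or 5
          have hc3 : s.length / 3 * 3 = 3 := by omega
          have hfirst : PySem.List.slice s (some 0) (some (-((s.length / 3 * 3 : Nat) : Int))) =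
              s.take (s.length - 3) := by
            rw [hc3, PySem.List.slice_zero_start,
              PySem.List.slice_to_neg_natCast s 3 (by norm_num)]
          rw [hfirst, hc3]
          rw [commaChunks_neg s _ _ (by norm_num)]
          rw [pvGrp_step h3]
          rw [if_neg (by rintro (h | h) <;> omega)]
          rw [pvGrp_small (show (s.take (s.length - 3)).length ≤ 3 from by
            rw [List.length_take_of_le (by omega)]; omega)]
          rw [show [s.take (s.length - 3)] ++ [s.drop (s.length - 3)] =
              [s.take (s.length - 3), s.drop (s.length - 3)] from rfl,
            PySem.Chars.join_cons_cons, PySem.Chars.join_singleton]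
          simp

-- ===== the B side =====

theorem pvFoldB (N : Nat) : ∀ (s : List Char), s.length ≤ N →
    (PySem.List.enumerate s 0).foldl
      (fun acc p =>
        (if 0 < p.1 ∧ PySem.Int.mod (((s.length : Nat) : Int) - p.1) 3 = 0 then acc ++ [','] else acc)
          ++ [p.2]) [] = pvGrp s := by
  induction N with
  | zero =>
    intro s hs
    have : s = [] := List.length_eq_zero_iff.mp (by omega)
    subst this
    simp [PySem.List.enumerate, pvGrp_small]
  | succ N IH =>
    intro s hs
    by_cases h3 : s.length ≤ 3
    · rcases s with _ | ⟨a, _ | ⟨b, _ | ⟨c, _ | ⟨d, t⟩⟩⟩⟩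
      · simp [PySem.List.enumerate, pvGrp_small]
      · rw [pvGrp_small (by simp)]
        simp [PySem.List.enumerate]
      · rw [pvGrp_small (by simp)]
        norm_num [PySem.List.enumerate, List.foldl,
          show PySem.Int.mod 1 3 = 1 from by decide]
      · rw [pvGrp_small (by simp)]
        norm_num [PySem.List.enumerate, List.foldl,
          show PySem.Int.mod 1 3 = 1 from by decide,
          show PySem.Int.mod 2 3 = 2 from by decide]
      · exfalso; simp only [List.length_cons] at h3; omega
    · rw [Nat.not_le] at h3
      have htl : (s.take (s.length - 3)).length = s.length - 3 :=
        List.length_take_of_le (by omega)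
      have hul : (s.drop (s.length - 3)).length = 3 := by simp; omega
      obtain ⟨x, y, z, hxyz⟩ := List.length_eq_three.mp hul
      have henum : PySem.List.enumerate s 0 =
          PySem.List.enumerate (s.take (s.length - 3)) 0 ++
            PySem.List.enumerate (s.drop (s.length - 3))
              (0 + ((s.take (s.length - 3)).length : Int)) := by
        conv_lhs => rw [← List.take_append_drop (s.length - 3) s]
        rw [PySem.List.enumerate_append]
      rw [henum, List.foldl_append]
      have e1 : (((s.length : Nat) : Int) - (0 + ((s.take (s.length - 3)).length : Int))) = 3 := by
        rw [htl]; omega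
      have e2 : (((s.length : Nat) : Int) - (0 + ((s.take (s.length - 3)).length : Int) + 1)) = 2 := by
        rw [htl]; omega
      have e3 : (((s.length : Nat) : Int) - (0 + ((s.take (s.length - 3)).length : Int) + 1 + 1)) = 1 := by
        rw [htl]; omega
      have hpos : (0 : Int) < 0 + ((s.take (s.length - 3)).length : Int) := by
        rw [htl]; omega
      rw [hxyz]
      simp only [PySem.List.enumerate, List.foldl]
      rw [e1, e2, e3, show PySem.Int.mod 3 3 = 0 from by decide,
        show PySem.Int.mod 2 3 = 2 from by decide,
        show PySem.Int.mod 1 3 = 1 from by decide]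
      rw [if_neg (show ¬ (0 < 0 + ((s.take (s.length - 3)).length : Int) + 1 + 1 ∧ (1 : Int) = 0) from
          by rintro ⟨-, hcon⟩; exact absurd hcon (by norm_num))]
      rw [if_neg (show ¬ (0 < 0 + ((s.take (s.length - 3)).length : Int) + 1 ∧ (2 : Int) = 0) from
          by rintro ⟨-, hcon⟩; exact absurd hcon (by norm_num))]
      rw [if_pos (show (0 < 0 + ((s.take (s.length - 3)).length : Int) ∧ (0 : Int) = 0) from ⟨hpos, rfl⟩)]
      have hcongr : (PySem.List.enumerate (s.take (s.length - 3)) 0).foldl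
            (fun acc p =>
              (if 0 < p.1 ∧ PySem.Int.mod (((s.length : Nat) : Int) - p.1) 3 = 0 then acc ++ [','] else acc)
                ++ [p.2]) [] =
          (PySem.List.enumerate (s.take (s.length - 3)) 0).foldl
            (fun acc p =>
              (if 0 < p.1 ∧ PySem.Int.mod ((((s.take (s.length - 3)).length : Nat) : Int) - p.1) 3 = 0 then acc ++ [','] else acc)
                ++ [p.2]) [] := by
        apply PySem.List.foldl_congr_mem
        intro acc p _
        have hmod : (PySem.Int.mod (((s.length : Nat) : Int) - p.1) 3 = 0) ↔
            (PySem.Int.mod ((((s.take (s.length - 3)).length : Nat) : Int) - p.1) 3 = 0) := by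
          rw [PySem.Int.mod_eq_zero_iff_dvd, PySem.Int.mod_eq_zero_iff_dvd, htl]
          constructor <;> intro hd <;> omega
        by_cases h1 : 0 < p.1
        · by_cases h2 : PySem.Int.mod (((s.length : Nat) : Int) - p.1) 3 = 0
          · rw [if_pos ⟨h1, h2⟩, if_pos ⟨h1, hmod.mp h2⟩]
          · rw [if_neg (fun hx => h2 hx.2), if_neg (fun hx => h2 (hmod.mpr hx.2))]
        · rw [if_neg (fun hx => h1 hx.1), if_neg (fun hx => h1 hx.1)]
      rw [hcongr, IH (s.take (s.length - 3)) (by omega)]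
      rw [pvGrp_step h3, hxyz]
      simp

-- ===== assembling the two sides =====

theorem pvA_eq_grp (n : Int) : comma_machine n = String.ofList (pvGrp (PySem.Int.toChars n)) := by
  have hne : PySem.Int.toChars n ≠ [] := pvToChars_ne_nil n
  obtain ⟨a, ha⟩ := Option.ne_none_iff_exists'.mp
    (fun hx => hne (List.head?_eq_none_iff.mp hx))
  obtain ⟨b, hb⟩ := Option.ne_none_iff_exists'.mp
    (fun hx => hne (List.getLast?_eq_none_iff.mp hx))
  have ha' : a ≠ ',' := pvToChars_not_comma n a (List.mem_of_mem_head? (by rw [ha]; rfl))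
  have hb' : b ≠ ',' := pvToChars_not_comma n b (List.mem_of_mem_getLast? (by rw [hb]; rfl))
  have hga : (pvGrp (PySem.Int.toChars n)).head? = some a := by rw [pvGrp_head?]; exact ha
  have hgb : (pvGrp (PySem.Int.toChars n)).getLast? = some b := by rw [pvGrp_getLast?]; exact hb
  simp only [comma_machine]
  rw [pvJoinA]
  by_cases hcond : (PySem.Int.toChars n).length ≤ 3 ∨ 3 ∣ (PySem.Int.toChars n).length
  · rw [if_pos hcond, List.singleton_append, pvStrip_cons,
      pvStrip_id _ a b hga ha' hgb hb']
  · rw [if_neg hcond, List.nil_append, pvStrip_id _ a b hga ha' hgb hb']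

theorem pvB_eq_grp (n : Int) :
    comma_machine_alt n = String.ofList (pvGrp (PySem.Int.toChars n)) := by
  simp only [comma_machine_alt]
  rw [pvFoldB (PySem.Int.toChars n).length (PySem.Int.toChars n) (le_refl _)]

-- ===== VERDICT (by name: the statement is the Claim_ definition above) =====
theorem comma_machine_spec : Claim_equal_comma_machine := by
  intro n _
  unfold Spec_comma_machine
  rw [pvA_eq_grp, pvB_eq_grp]
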